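-- pv_equiv track=rewrite | github.com/Buzkilington847/sentiment_analysis | main.py | count_correct_predictions
-- ===== SOURCE A (Python) =====
-- def count_correct_predictions(actual_labels, predicted_labels):
--     correct_count = 0
--     wrong_count = 0
--     for actual, predicted in zip(actual_labels, predicted_labels):
--         if actual == predicted:
--             correct_count += 1
--         else:
--             wrong_count += 1
--     return correct_count, wrong_count
-- ===== SOURCE B (Python) =====
-- def count_correct_predictions(actual_labels, predicted_labels):
--     pairs = list(zip(actual_labels, predicted_labels))
--
--     def go(lo, hi):
--         if hi - lo == 0:
--             return (0, 0)
--         if hi - lo == 1: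
--             a, p = pairs[lo]
--             return (1, 0) if a == p else (0, 1)
--         mid = (lo + hi) // 2
--         c1, w1 = go(lo, mid)
--         c2, w2 = go(mid, hi)
--         return (c1 + c2, w1 + w2)
--
--     return go(0, len(pairs))
-- ===== Notes on version B (the rewrite author's own statement) =====
-- stated objective: alternative
-- what changed: Replaces the linear two-counter scan by a divide-and-conquer recursion on the index range of the zipped pairs: singleton ranges yield a unit count and halves are combined by componentwise addition.
import Mathlib
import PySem

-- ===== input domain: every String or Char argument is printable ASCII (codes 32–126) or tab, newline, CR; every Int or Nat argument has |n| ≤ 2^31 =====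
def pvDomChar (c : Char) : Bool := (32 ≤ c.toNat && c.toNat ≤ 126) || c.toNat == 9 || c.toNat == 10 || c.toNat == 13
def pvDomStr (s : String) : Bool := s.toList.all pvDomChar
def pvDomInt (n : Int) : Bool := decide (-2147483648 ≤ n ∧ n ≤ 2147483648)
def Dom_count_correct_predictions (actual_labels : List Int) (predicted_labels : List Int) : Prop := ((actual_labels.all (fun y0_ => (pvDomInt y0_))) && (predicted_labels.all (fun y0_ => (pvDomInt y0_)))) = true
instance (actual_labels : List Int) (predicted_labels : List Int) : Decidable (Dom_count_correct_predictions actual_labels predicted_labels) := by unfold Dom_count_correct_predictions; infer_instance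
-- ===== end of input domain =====

-- B replaces A's linear two-counter scan by divide-and-conquer on the index range of the zipped pairs.

-- ===== PORT A =====
-- A: single loop over zip with two counters, incrementing one or the other.
def count_correct_predictions (actual_labels : List Int) (predicted_labels : List Int) : Int × Int :=
  (actual_labels.zip predicted_labels).foldl
    (fun (s : Int × Int) q => if q.1 = q.2 then (s.1 + 1, s.2) else (s.1, s.2 + 1))
    (0, 0)

-- ===== PORT B =====
-- B's helper go(lo, hi): divide-and-conquer on the half-open index range [lo, hi) of pairs.
def ccpGo (pairs : List (Int × Int)) (lo hi : Nat) : Int × Int :=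
  if _h0 : hi - lo = 0 then (0, 0)
  else if _h1 : hi - lo = 1 then
    match pairs[lo]? with
    | some q => if q.1 = q.2 then (1, 0) else (0, 1)
    | none => (0, 0)   -- unreachable: callers keep hi ≤ pairs.length
  else
    let mid := (lo + hi) / 2
    let r1 := ccpGo pairs lo mid
    let r2 := ccpGo pairs mid hi
    (r1.1 + r2.1, r1.2 + r2.2)
termination_by hi - lo
decreasing_by all_goals omega

-- B: materialize the pairs, then recurse over index halves, combining by addition.
def count_correct_predictions_alt (actual_labels : List Int) (predicted_labels : List Int) : Int × Int :=
  let pairs := actual_labels.zip predicted_labels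
  ccpGo pairs 0 pairs.length

-- ===== PRECONDITION & SPEC =====
def Spec_count_correct_predictions (actual_labels : List Int) (predicted_labels : List Int) (out : Int × Int) : Prop := out = count_correct_predictions_alt actual_labels predicted_labels
instance (actual_labels : List Int) (predicted_labels : List Int) (out : Int × Int) : Decidable (Spec_count_correct_predictions actual_labels predicted_labels out) := by unfold Spec_count_correct_predictions; infer_instance

-- ===== CLAIM (what is proved, stated in full; the proofs are below) =====
def Claim_equal_count_correct_predictions : Prop := ∀ (actual_labels : List Int) (predicted_labels : List Int), Dom_count_correct_predictions actual_labels predicted_labels → Spec_count_correct_predictions actual_labels predicted_labels (count_correct_predictions actual_labels predicted_labels)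

-- ===== LEMMAS AND PROOFS =====

-- A's fold, from any start (c, w): adds the match count to c and the rest to w.
theorem pv_fold_inv (l : List (Int × Int)) (c w : Int) :
    l.foldl (fun (s : Int × Int) q => if q.1 = q.2 then (s.1 + 1, s.2) else (s.1, s.2 + 1)) (c, w)
      = (c + (l.countP (fun q => q.1 == q.2) : Nat),
         w + ((l.length : Int) - (l.countP (fun q => q.1 == q.2) : Nat))) := by
  induction l generalizing c w with
  | nil => simp
  | cons q t ih =>
    by_cases h : q.1 = q.2 <;>
      simp [List.foldl, h, ih] <;> ring

-- B's recursion computes the match/mismatch counts of the segment pairs[lo:hi].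
theorem pv_go_eq (pairs : List (Int × Int)) (lo hi : Nat)
    (hle : lo ≤ hi) (hhi : hi ≤ pairs.length) :
    ccpGo pairs lo hi
      = (((((pairs.drop lo).take (hi - lo)).countP (fun q => q.1 == q.2) : Nat) : Int),
         ((hi - lo : Nat) : Int) - (((pairs.drop lo).take (hi - lo)).countP (fun q => q.1 == q.2) : Nat)) := by
  rw [ccpGo.eq_def]
  by_cases h0 : hi - lo = 0
  · simp [h0]
  · by_cases h1 : hi - lo = 1
    · have hlt : lo < pairs.length := by omega
      have hget : pairs[lo]? = some pairs[lo] := List.getElem?_eq_getElem hlt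
      have hseg : (pairs.drop lo).take 1 = [pairs[lo]] := by
        rw [List.take_one]
        simp [List.head?_drop, List.getElem?_eq_getElem hlt]
      by_cases hq : pairs[lo].1 = pairs[lo].2 <;>
        simp [h1, hget, hseg, hq]
    · have hmid1 : lo < (lo + hi) / 2 := by omega
      have hmid2 : (lo + hi) / 2 < hi := by omega
      have hsplit : (pairs.drop lo).take (hi - lo)
          = (pairs.drop lo).take ((lo + hi) / 2 - lo)
            ++ (pairs.drop ((lo + hi) / 2)).take (hi - (lo + hi) / 2) := by
        have h2 : hi - lo = ((lo + hi) / 2 - lo) + (hi - (lo + hi) / 2) := by omega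
        rw [h2, List.take_add, List.drop_drop]
        rw [(by omega : lo + ((lo + hi) / 2 - lo) = (lo + hi) / 2)]
      simp only [h0, h1, dite_false]
      rw [pv_go_eq pairs lo ((lo + hi) / 2) (by omega) (by omega),
          pv_go_eq pairs ((lo + hi) / 2) hi (by omega) hhi,
          hsplit, List.countP_append]
      simp only [Prod.mk.injEq]
      constructor <;> omega
termination_by hi - lo
decreasing_by all_goals omega

-- ===== VERDICT (by name: the statement is the Claim_ definition above) =====
theorem count_correct_predictions_spec : Claim_equal_count_correct_predictions := by
  intro a p _
  unfold Spec_count_correct_predictions count_correct_predictions count_correct_predictions_alt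
  rw [pv_fold_inv, pv_go_eq _ 0 _ (Nat.zero_le _) le_rfl]
  simp [-List.length_zip]
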